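/- GENERATED by farm/mkstatement.py from design/units.split.tsv — do not edit.
   THE SPLIT of the proof unit `decode_all` into `decode_all.1`, `decode_all.2`, `decode_all.3`, `decode_all.4`, `decode_all.5`, `decode_all.6`, `decode_all.7`, `decode_all.COMPOSITION`: the children's statements give the parent's
   UNCHANGED statement (so nothing above the parent — callers, compositions — is touched by the split). -/
import Vorbis.Spec.Units.decode_all
import Vorbis.Spec.Units.decode_all_1
import Vorbis.Spec.Units.decode_all_2
import Vorbis.Spec.Units.decode_all_3
import Vorbis.Spec.Units.decode_all_4
import Vorbis.Spec.Units.decode_all_5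
import Vorbis.Spec.Units.decode_all_6
import Vorbis.Spec.Units.decode_all_7
import Vorbis.Spec.Units.decode_all_COMPOSITION
namespace Vorbis.Spec.Splits
open X86 X86.User Asan

/-- The segments of the split function `decode_all` and their composition prove its contract. -/
theorem decode_all
    (h_decode_all_1 : Vorbis.Spec.decode_all_1.Statement)
    (h_decode_all_2 : Vorbis.Spec.decode_all_2.Statement)
    (h_decode_all_3 : Vorbis.Spec.decode_all_3.Statement)
    (h_decode_all_4 : Vorbis.Spec.decode_all_4.Statement)
    (h_decode_all_5 : Vorbis.Spec.decode_all_5.Statement)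
    (h_decode_all_6 : Vorbis.Spec.decode_all_6.Statement)
    (h_decode_all_7 : Vorbis.Spec.decode_all_7.Statement)
    (h_decode_all_COMPOSITION : Vorbis.Spec.decode_all_COMPOSITION.Statement) :
    Vorbis.Spec.decode_all.Statement := by
  intro Lay _hLay μ _hμ u₀ _hcode _h_stb_vorbis_open_memory _h_asan_load4_noabort _h_stb_vorbis_get_frame_float _h_copy_frame _h_put_header _h_stb_vorbis_get_error _h_stb_vorbis_close
  exact h_decode_all_COMPOSITION Lay _hLay μ _hμ u₀
    (h_decode_all_1 Lay _hLay μ _hμ u₀ _hcode _h_stb_vorbis_open_memory)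
    (h_decode_all_2 Lay _hLay μ _hμ u₀ _hcode _h_asan_load4_noabort _h_put_header)
    (h_decode_all_3 Lay _hLay μ _hμ u₀ _hcode _h_stb_vorbis_get_frame_float)
    (h_decode_all_4 Lay _hLay μ _hμ u₀ _hcode _h_copy_frame)
    (h_decode_all_5 Lay _hLay μ _hμ u₀ _hcode _h_stb_vorbis_get_error _h_stb_vorbis_close)
    (h_decode_all_6 Lay _hLay μ _hμ u₀ _hcode _h_put_header)
    (h_decode_all_7 Lay _hLay μ _hμ u₀ _hcode)

end Vorbis.Spec.Splits
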